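-- pv_equiv track=rewrite | github.com/RavenInDisguise/Criptography | codificarLibreria.py | cortarNumero
-- ===== SOURCE A (Python) =====
-- def cortarNumero(pnumero):
--     """
--     Funcionalidad: Dividir el número en dos partes.
--     Entrada: El número int(pnumero).
--     Salida: El número cortado int(num1, num2).
--     """
--     contador=0
--     num1=0
--     num2=0
--     div=0
--     while pnumero>0:
--         contador+=1
--         div=pnumero%10
--         if(contador==1):
--             num2=div
--         else:
--             num1=div
--         pnumero //= 10
--     return num1, num2
-- ===== SOURCE B (Python) =====
-- def cortarNumero(pnumero):
--     # Leading digit read off a fixed power-of-10 table (covers 32-bit-sized inputs):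
--     # num1 is pnumero // pw for the largest table power pw <= pnumero (0 if none),
--     # num2 is the last digit; non-positive inputs yield (0, 0) as in the original.
--     if pnumero <= 0:
--         return 0, 0
--     num2 = pnumero % 10
--     num1 = 0
--     for pw in (10, 100, 1000, 10000, 100000,
--                1000000, 10000000, 100000000, 1000000000):
--         if pw <= pnumero:
--             num1 = pnumero // pw
--     return num1, num2
-- ===== Notes on version B (the rewrite author's own statement) =====
-- stated objective: alternative
-- what changed: Replaces A's digit-stripping while-loop (which divides the input by 10 repeatedly and overwrites two accumulators under a counter) by a scan of a fixed power-of-10 table: the trailing digit is a single modulus and the leading digit is a single division by the largest table power not exceeding the input.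
import Mathlib
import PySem

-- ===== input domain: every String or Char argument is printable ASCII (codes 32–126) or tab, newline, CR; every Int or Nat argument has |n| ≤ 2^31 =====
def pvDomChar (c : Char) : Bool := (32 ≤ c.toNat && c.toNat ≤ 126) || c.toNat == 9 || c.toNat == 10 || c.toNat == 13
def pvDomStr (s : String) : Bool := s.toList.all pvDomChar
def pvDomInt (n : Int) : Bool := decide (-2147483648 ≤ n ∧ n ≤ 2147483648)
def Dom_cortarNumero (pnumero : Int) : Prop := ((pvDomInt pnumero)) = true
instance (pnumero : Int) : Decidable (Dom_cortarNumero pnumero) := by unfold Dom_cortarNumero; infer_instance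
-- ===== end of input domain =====

-- B replaces A's digit-stripping loop by a scan of a fixed power-of-10 table
-- (one division, one modulus); objective: alternative algorithm, equal on Dom.

-- ===== PORT A =====
-- while pnumero>0: contador+=1; div=pnumero%10; (num2 if contador==1 else num1):=div; pnumero //= 10
def cortarNumeroLoop (pnumero contador num1 num2 : Int) : Int × Int :=
  if _h : pnumero > 0 then
    let contador' := contador + 1
    let div := PySem.Int.mod pnumero 10
    let st := if contador' = 1 then (num1, div) else (div, num2)
    cortarNumeroLoop (PySem.Int.floordiv pnumero 10) contador' st.1 st.2
  else (num1, num2)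
termination_by pnumero.toNat
decreasing_by
  rw [PySem.Int.floordiv_eq_ediv_of_pos (by norm_num)]
  omega

def cortarNumero (pnumero : Int) : Int × Int :=
  cortarNumeroLoop pnumero 0 0 0

-- ===== PORT B =====
-- the tuple (10, 100, ..., 1000000000) of Source B
def pvPows : List Int :=
  [10, 100, 1000, 10000, 100000, 1000000, 10000000, 100000000, 1000000000]

-- for pw in pvPows: if pw <= pnumero: num1 = pnumero // pw
def cortarNumero_alt (pnumero : Int) : Int × Int :=
  if pnumero ≤ 0 then (0, 0)
  else
    let num2 := PySem.Int.mod pnumero 10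
    let num1 := pvPows.foldl
      (fun num1 pw => if pw ≤ pnumero then PySem.Int.floordiv pnumero pw else num1) 0
    (num1, num2)

-- ===== PRECONDITION & SPEC =====
def Spec_cortarNumero (pnumero : Int) (out : Int × Int) : Prop := out = cortarNumero_alt pnumero
instance (pnumero : Int) (out : Int × Int) : Decidable (Spec_cortarNumero pnumero out) := by unfold Spec_cortarNumero; infer_instance

-- ===== CLAIM (what is proved, stated in full; the proofs are below) =====
def Claim_equal_cortarNumero : Prop := ∀ (pnumero : Int), Dom_cortarNumero pnumero → Spec_cortarNumero pnumero (cortarNumero pnumero)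

-- ===== LEMMAS AND PROOFS =====

-- Once the counter is ≥ 1, A's loop on 10^k ≤ p < 10^(k+1) ends with
-- num1 = leading digit = p / 10^k and num2 untouched.
theorem cortarNumeroLoop_leading (k : Nat) :
    ∀ (p : Int), 10 ^ k ≤ p → p < 10 ^ (k + 1) → ∀ (c n1 n2 : Int), 1 ≤ c →
      cortarNumeroLoop p c n1 n2 = (p / 10 ^ k, n2) := by
  induction k with
  | zero =>
    intro p h1 h2 c n1 n2 hc
    rw [show ((10:Int) ^ 0) = 1 by norm_num] at h1 ⊢
    rw [show ((10:Int) ^ (0 + 1)) = 10 by norm_num] at h2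
    rw [cortarNumeroLoop]
    simp only [show p > 0 by omega, dif_pos, show ¬ (c + 1 = 1) by omega, if_false]
    rw [PySem.Int.mod_eq_emod_of_pos (by norm_num),
        PySem.Int.floordiv_eq_ediv_of_pos (by norm_num)]
    rw [show p / 10 = 0 by omega, cortarNumeroLoop]
    simp only [show ¬ ((0:Int) > 0) by omega, dif_neg, not_false_iff, Prod.mk.injEq]
    exact ⟨by omega, by trivial⟩
  | succ k ih =>
    intro p h1 h2 c n1 n2 hc
    have hp : (0:Int) < p := lt_of_lt_of_le (by positivity) h1
    rw [cortarNumeroLoop]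
    simp only [show p > 0 from hp, dif_pos, show ¬ (c + 1 = 1) by omega, if_false]
    have hb1 : 10 ^ k ≤ PySem.Int.floordiv p 10 := by
      rw [PySem.Int.le_floordiv_iff_mul_le (by norm_num), ← pow_succ]; exact h1
    have hb2 : PySem.Int.floordiv p 10 < 10 ^ (k + 1) := by
      rw [PySem.Int.floordiv_lt_iff_lt_mul (by norm_num), ← pow_succ]; exact h2
    rw [ih (PySem.Int.floordiv p 10) hb1 hb2 (c + 1) _ n2 (by omega)]
    rw [PySem.Int.floordiv_eq_ediv_of_pos (by norm_num),
        Int.ediv_ediv_of_nonneg (by norm_num), ← pow_succ']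

-- A's whole run on an input with q ≤ p < 10*q, q = 10^(k+1) (i.e. k+2 digits):
-- trailing digit p % 10, leading digit p / q.
theorem cortarNumero_value (k : Nat) (q p : Int) (hq : q = 10 ^ (k + 1))
    (h1 : q ≤ p) (h2 : p < 10 * q) :
    cortarNumeroLoop p 0 0 0 = (p / q, PySem.Int.mod p 10) := by
  subst hq
  have hp : (0:Int) < p := lt_of_lt_of_le (by positivity) h1
  have h2' : p < 10 ^ (k + 2) := by
    calc p < 10 * 10 ^ (k + 1) := h2
    _ = 10 ^ (k + 2) := by rw [← pow_succ']
  rw [cortarNumeroLoop]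
  simp only [show p > 0 from hp, dif_pos]
  rw [if_pos (show (0:Int) + 1 = 1 by norm_num)]
  have hb1 : 10 ^ k ≤ PySem.Int.floordiv p 10 := by
    rw [PySem.Int.le_floordiv_iff_mul_le (by norm_num), ← pow_succ]; exact h1
  have hb2 : PySem.Int.floordiv p 10 < 10 ^ (k + 1) := by
    rw [PySem.Int.floordiv_lt_iff_lt_mul (by norm_num), ← pow_succ]; exact h2'
  rw [cortarNumeroLoop_leading k (PySem.Int.floordiv p 10) hb1 hb2 (0 + 1) 0
      (PySem.Int.mod p 10) (by norm_num)]
  rw [PySem.Int.floordiv_eq_ediv_of_pos (by norm_num),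
      Int.ediv_ediv_of_nonneg (by norm_num), ← pow_succ']

-- ===== VERDICT (by name: the statement is the Claim_ definition above) =====
theorem cortarNumero_spec : Claim_equal_cortarNumero := by
  unfold Claim_equal_cortarNumero Spec_cortarNumero
  intro p hdom
  have hub : p ≤ 2147483648 := by
    simp only [Dom_cortarNumero, pvDomInt, decide_eq_true_eq] at hdom
    exact hdom.2
  unfold cortarNumero cortarNumero_alt
  by_cases hneg : p ≤ 0
  · rw [cortarNumeroLoop]
    simp [show ¬ (p > 0) by omega, hneg]
  · simp only [hneg, if_false]
    by_cases hsmall : p < 10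
    · rw [cortarNumeroLoop]
      simp only [show p > 0 by omega, dif_pos]
      rw [if_pos (show (0:Int) + 1 = 1 by norm_num)]
      rw [show PySem.Int.floordiv p 10 = 0 by
        rw [PySem.Int.floordiv_eq_ediv_of_pos (by norm_num)]; omega]
      rw [cortarNumeroLoop]
      simp only [show ¬ ((0:Int) > 0) by omega, dif_neg, not_false_iff]
      simp only [pvPows, List.foldl]
      rw [if_neg (show ¬((10:Int) ≤ p) by omega),
          if_neg (show ¬((100:Int) ≤ p) by omega),
          if_neg (show ¬((1000:Int) ≤ p) by omega),
          if_neg (show ¬((10000:Int) ≤ p) by omega),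
          if_neg (show ¬((100000:Int) ≤ p) by omega),
          if_neg (show ¬((1000000:Int) ≤ p) by omega),
          if_neg (show ¬((10000000:Int) ≤ p) by omega),
          if_neg (show ¬((100000000:Int) ≤ p) by omega),
          if_neg (show ¬((1000000000:Int) ≤ p) by omega)]
    · have hcase : (10 ≤ p ∧ p < 100) ∨ (100 ≤ p ∧ p < 1000) ∨ (1000 ≤ p ∧ p < 10000) ∨
        (10000 ≤ p ∧ p < 100000) ∨ (100000 ≤ p ∧ p < 1000000) ∨
        (1000000 ≤ p ∧ p < 10000000) ∨ (10000000 ≤ p ∧ p < 100000000) ∨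
        (100000000 ≤ p ∧ p < 1000000000) ∨ (1000000000 ≤ p ∧ p < 10000000000) := by omega
      rcases hcase with ⟨h1,h2⟩|⟨h1,h2⟩|⟨h1,h2⟩|⟨h1,h2⟩|⟨h1,h2⟩|⟨h1,h2⟩|⟨h1,h2⟩|⟨h1,h2⟩|⟨h1,h2⟩
      · rw [cortarNumero_value 0 10 p (by norm_num) (by omega) (by omega)]
        simp only [pvPows, List.foldl]
        rw [if_pos (show (10:Int) ≤ p by omega),
            if_neg (show ¬((100:Int) ≤ p) by omega),
            if_neg (show ¬((1000:Int) ≤ p) by omega),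
            if_neg (show ¬((10000:Int) ≤ p) by omega),
            if_neg (show ¬((100000:Int) ≤ p) by omega),
            if_neg (show ¬((1000000:Int) ≤ p) by omega),
            if_neg (show ¬((10000000:Int) ≤ p) by omega),
            if_neg (show ¬((100000000:Int) ≤ p) by omega),
            if_neg (show ¬((1000000000:Int) ≤ p) by omega),
            PySem.Int.floordiv_eq_ediv_of_pos (show (0:Int) < 10 by norm_num)]
      · rw [cortarNumero_value 1 100 p (by norm_num) (by omega) (by omega)]
        simp only [pvPows, List.foldl]
        rw [if_pos (show (10:Int) ≤ p by omega),
            if_pos (show (100:Int) ≤ p by omega),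
            if_neg (show ¬((1000:Int) ≤ p) by omega),
            if_neg (show ¬((10000:Int) ≤ p) by omega),
            if_neg (show ¬((100000:Int) ≤ p) by omega),
            if_neg (show ¬((1000000:Int) ≤ p) by omega),
            if_neg (show ¬((10000000:Int) ≤ p) by omega),
            if_neg (show ¬((100000000:Int) ≤ p) by omega),
            if_neg (show ¬((1000000000:Int) ≤ p) by omega),
            PySem.Int.floordiv_eq_ediv_of_pos (show (0:Int) < 100 by norm_num)]
      · rw [cortarNumero_value 2 1000 p (by norm_num) (by omega) (by omega)]
        simp only [pvPows, List.foldl]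
        rw [if_pos (show (10:Int) ≤ p by omega),
            if_pos (show (100:Int) ≤ p by omega),
            if_pos (show (1000:Int) ≤ p by omega),
            if_neg (show ¬((10000:Int) ≤ p) by omega),
            if_neg (show ¬((100000:Int) ≤ p) by omega),
            if_neg (show ¬((1000000:Int) ≤ p) by omega),
            if_neg (show ¬((10000000:Int) ≤ p) by omega),
            if_neg (show ¬((100000000:Int) ≤ p) by omega),
            if_neg (show ¬((1000000000:Int) ≤ p) by omega),
            PySem.Int.floordiv_eq_ediv_of_pos (show (0:Int) < 1000 by norm_num)]
      · rw [cortarNumero_value 3 10000 p (by norm_num) (by omega) (by omega)]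
        simp only [pvPows, List.foldl]
        rw [if_pos (show (10:Int) ≤ p by omega),
            if_pos (show (100:Int) ≤ p by omega),
            if_pos (show (1000:Int) ≤ p by omega),
            if_pos (show (10000:Int) ≤ p by omega),
            if_neg (show ¬((100000:Int) ≤ p) by omega),
            if_neg (show ¬((1000000:Int) ≤ p) by omega),
            if_neg (show ¬((10000000:Int) ≤ p) by omega),
            if_neg (show ¬((100000000:Int) ≤ p) by omega),
            if_neg (show ¬((1000000000:Int) ≤ p) by omega),
            PySem.Int.floordiv_eq_ediv_of_pos (show (0:Int) < 10000 by norm_num)]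
      · rw [cortarNumero_value 4 100000 p (by norm_num) (by omega) (by omega)]
        simp only [pvPows, List.foldl]
        rw [if_pos (show (10:Int) ≤ p by omega),
            if_pos (show (100:Int) ≤ p by omega),
            if_pos (show (1000:Int) ≤ p by omega),
            if_pos (show (10000:Int) ≤ p by omega),
            if_pos (show (100000:Int) ≤ p by omega),
            if_neg (show ¬((1000000:Int) ≤ p) by omega),
            if_neg (show ¬((10000000:Int) ≤ p) by omega),
            if_neg (show ¬((100000000:Int) ≤ p) by omega),
            if_neg (show ¬((1000000000:Int) ≤ p) by omega),
            PySem.Int.floordiv_eq_ediv_of_pos (show (0:Int) < 100000 by norm_num)]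
      · rw [cortarNumero_value 5 1000000 p (by norm_num) (by omega) (by omega)]
        simp only [pvPows, List.foldl]
        rw [if_pos (show (10:Int) ≤ p by omega),
            if_pos (show (100:Int) ≤ p by omega),
            if_pos (show (1000:Int) ≤ p by omega),
            if_pos (show (10000:Int) ≤ p by omega),
            if_pos (show (100000:Int) ≤ p by omega),
            if_pos (show (1000000:Int) ≤ p by omega),
            if_neg (show ¬((10000000:Int) ≤ p) by omega),
            if_neg (show ¬((100000000:Int) ≤ p) by omega),
            if_neg (show ¬((1000000000:Int) ≤ p) by omega),
            PySem.Int.floordiv_eq_ediv_of_pos (show (0:Int) < 1000000 by norm_num)]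
      · rw [cortarNumero_value 6 10000000 p (by norm_num) (by omega) (by omega)]
        simp only [pvPows, List.foldl]
        rw [if_pos (show (10:Int) ≤ p by omega),
            if_pos (show (100:Int) ≤ p by omega),
            if_pos (show (1000:Int) ≤ p by omega),
            if_pos (show (10000:Int) ≤ p by omega),
            if_pos (show (100000:Int) ≤ p by omega),
            if_pos (show (1000000:Int) ≤ p by omega),
            if_pos (show (10000000:Int) ≤ p by omega),
            if_neg (show ¬((100000000:Int) ≤ p) by omega),
            if_neg (show ¬((1000000000:Int) ≤ p) by omega),
            PySem.Int.floordiv_eq_ediv_of_pos (show (0:Int) < 10000000 by norm_num)]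
      · rw [cortarNumero_value 7 100000000 p (by norm_num) (by omega) (by omega)]
        simp only [pvPows, List.foldl]
        rw [if_pos (show (10:Int) ≤ p by omega),
            if_pos (show (100:Int) ≤ p by omega),
            if_pos (show (1000:Int) ≤ p by omega),
            if_pos (show (10000:Int) ≤ p by omega),
            if_pos (show (100000:Int) ≤ p by omega),
            if_pos (show (1000000:Int) ≤ p by omega),
            if_pos (show (10000000:Int) ≤ p by omega),
            if_pos (show (100000000:Int) ≤ p by omega),
            if_neg (show ¬((1000000000:Int) ≤ p) by omega),
            PySem.Int.floordiv_eq_ediv_of_pos (show (0:Int) < 100000000 by norm_num)]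
      · rw [cortarNumero_value 8 1000000000 p (by norm_num) (by omega) (by omega)]
        simp only [pvPows, List.foldl]
        rw [if_pos (show (10:Int) ≤ p by omega),
            if_pos (show (100:Int) ≤ p by omega),
            if_pos (show (1000:Int) ≤ p by omega),
            if_pos (show (10000:Int) ≤ p by omega),
            if_pos (show (100000:Int) ≤ p by omega),
            if_pos (show (1000000:Int) ≤ p by omega),
            if_pos (show (10000000:Int) ≤ p by omega),
            if_pos (show (100000000:Int) ≤ p by omega),
            if_pos (show (1000000000:Int) ≤ p by omega),
            PySem.Int.floordiv_eq_ediv_of_pos (show (0:Int) < 1000000000 by norm_num)]
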